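-- pv_equiv track=rewrite | github.com/sspasojevic/CS5330_Final_Refactor | program/gesture_recognizer.py | get_consecutive_count
-- ===== SOURCE A (Python) =====
-- def get_consecutive_count(queue):
--     """
--     Counts how many times the last element appears consecutively at the end of the list.
--
--     Args:
--         queue (list): List of gesture names (strings).
--
--     Returns:
--         int: Number of times the last element repeats consecutively at the end.
--     """
--
--     # Check if the queue is empty
--     if not queue:
--         return 0
--
--     # Get the last item in the queue
--     last_item = queue[-1]
--     count = 0
--
--     # Count backwards from the end
--     for i in range(len(queue) - 1, -1, -1):
--         if queue[i] == last_item: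
--             count += 1
--         else:
--             break
--
--     return count
-- ===== SOURCE B (Python) =====
-- from itertools import groupby
--
--
-- def get_consecutive_count(queue):
--     """Length of the final maximal run: forward grouping via itertools.groupby."""
--     if not queue:
--         return 0
--     last_len = 0
--     for _, grp in groupby(queue):
--         last_len = sum(1 for _ in grp)
--     return last_len
-- ===== Notes on version B (the rewrite author's own statement) =====
-- stated objective: idiomatic
-- what changed: Replaces the backward index scan with a break by a forward itertools.groupby pass that keeps the length of the most recent run and returns the last one.
import Mathlib
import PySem

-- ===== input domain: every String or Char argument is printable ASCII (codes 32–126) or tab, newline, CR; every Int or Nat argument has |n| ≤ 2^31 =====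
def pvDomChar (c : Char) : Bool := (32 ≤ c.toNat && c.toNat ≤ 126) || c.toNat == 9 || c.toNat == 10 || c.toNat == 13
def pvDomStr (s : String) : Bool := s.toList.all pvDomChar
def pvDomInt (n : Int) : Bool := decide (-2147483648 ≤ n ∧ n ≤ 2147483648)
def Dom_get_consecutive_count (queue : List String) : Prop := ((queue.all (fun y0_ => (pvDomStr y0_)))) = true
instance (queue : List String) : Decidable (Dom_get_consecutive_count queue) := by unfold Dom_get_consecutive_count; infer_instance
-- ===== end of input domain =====

-- B replaces A's backward index scan (with break) by a forward grouping pass that keeps the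
-- length of the most recent run (itertools.groupby in Python); idiomatic, same cost.

-- ===== PORT A =====
-- the 'for i in range(len(queue)-1, -1, -1)' loop with its break, carrying `count`
def pvALoop (q : List String) (last_item : String) : List Int → Int → Int
  | [], count => count
  | i :: rest, count =>
    match PySem.List.pyGet? q i with
    | some x => if x = last_item then pvALoop q last_item rest (count + 1) else count
    | none => count  -- unreachable: every index produced by the range is in range

def get_consecutive_count (queue : List String) : Int :=
  if queue = [] then 0
  else
    match PySem.List.pyGet? queue (-1) with
    | some last_item =>
        pvALoop queue last_item (PySem.List.pyRange ((queue.length : Int) - 1) (-1) (-1)) 0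
    | none => 0  -- unreachable: queue is nonempty here

-- ===== PORT B =====
-- the 'for _, grp in groupby(queue): last_len = sum(1 for _ in grp)' pass: walk forward,
-- extending the current run's length or starting a new run of length 1; return the last one
def pvGroupLoop (key : String) (last_len : Int) : List String → Int
  | [] => last_len
  | y :: ys => if y = key then pvGroupLoop key (last_len + 1) ys else pvGroupLoop y 1 ys

def get_consecutive_count_alt (queue : List String) : Int :=
  match queue with
  | [] => 0
  | x :: xs => pvGroupLoop x 1 xs

-- ===== PRECONDITION & SPEC =====
def Spec_get_consecutive_count (queue : List String) (out : Int) : Prop := out = get_consecutive_count_alt queue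
instance (queue : List String) (out : Int) : Decidable (Spec_get_consecutive_count queue out) := by unfold Spec_get_consecutive_count; infer_instance

-- ===== CLAIM (what is proved, stated in full; the proofs are below) =====
def Claim_equal_get_consecutive_count : Prop := ∀ (queue : List String), Dom_get_consecutive_count queue → Spec_get_consecutive_count queue (get_consecutive_count queue)

-- ===== LEMMAS AND PROOFS =====

-- reference function: count the run at the head of the (already reversed) list
def pvRevLoop (k : String) : List String → Int → Int
  | [], c => c
  | y :: ys, c => if y = k then pvRevLoop k ys (c + 1) else c

-- length of the last maximal run of q
def pvTR (q : List String) : Int :=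
  match q.reverse with
  | [] => 0
  | y :: r => pvRevLoop y r 1

theorem pvRevLoop_cons (k y : String) (ys : List String) (c : Int) :
    pvRevLoop k (y :: ys) c = if y = k then pvRevLoop k ys (c + 1) else c := rfl

theorem pvGroupLoop_cons (k y : String) (c : Int) (ys : List String) :
    pvGroupLoop k c (y :: ys) = if y = k then pvGroupLoop k (c + 1) ys else pvGroupLoop y 1 ys := rfl

theorem pvALoop_congr (q1 q2 : List String) (l : String) (idxs : List Int) (c : Int)
    (h : ∀ i ∈ idxs, PySem.List.pyGet? q1 i = PySem.List.pyGet? q2 i) :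
    pvALoop q1 l idxs c = pvALoop q2 l idxs c := by
  induction idxs generalizing c with
  | nil => rfl
  | cons i rest ih =>
    simp only [pvALoop]
    rw [h i (by simp)]
    cases PySem.List.pyGet? q2 i with
    | none => rfl
    | some x =>
      by_cases hx : x = l
      · simp only [hx, if_pos rfl]
        exact ih _ (fun j hj => h j (by simp [hj]))
      · simp [hx]

theorem pvALoop_eq_revLoop (q : List String) (l : String) (c : Int) :
    pvALoop q l (PySem.List.pyRange ((q.length : Int) - 1) (-1) (-1)) c
      = pvRevLoop l q.reverse c := by
  induction q using List.reverseRecOn generalizing c with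
  | nil =>
    rw [PySem.List.pyRange_neg_one_eq_nil (by simp)]
    rfl
  | append_singleton q y ih =>
    have hlen : ((q ++ [y]).length : Int) - 1 = (q.length : Int) := by simp
    rw [hlen, PySem.List.pyRange_neg_one_cons (by omega)]
    have hget : PySem.List.pyGet? (q ++ [y]) (q.length : Int) = some y := by
      simpa using PySem.List.pyGet?_append_length (pre := q) (y := y) (ys := [])
    have step : pvALoop (q ++ [y]) l
        ((q.length : Int) :: PySem.List.pyRange ((q.length : Int) - 1) (-1) (-1)) c
        = if y = l then pvALoop (q ++ [y]) l (PySem.List.pyRange ((q.length : Int) - 1) (-1) (-1)) (c + 1) else c := by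
      simp [pvALoop, hget]
    rw [step, List.reverse_append]
    simp only [List.reverse_singleton, List.singleton_append, pvRevLoop_cons]
    by_cases hy : y = l
    · rw [if_pos hy, if_pos hy]
      rw [pvALoop_congr (q ++ [y]) q l _ (c + 1) ?_]
      · exact ih (c + 1)
      · intro i hi
        rw [PySem.List.mem_pyRange_neg_one] at hi
        have h0 : 0 ≤ i := by omega
        have h1 : i.toNat < q.length := by omega
        rw [PySem.List.pyGet?_of_nonneg _ h0, PySem.List.pyGet?_of_nonneg _ h0,
          List.getElem?_append_left h1]
    · rw [if_neg hy, if_neg hy]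

-- if the prefix r contains an element ≠ k, pvRevLoop never sees past r
theorem pvRevLoop_stop (r : List String) (k : String) (s t : List String) (c : Int)
    (h : ∃ z ∈ r, z ≠ k) :
    pvRevLoop k (r ++ s) c = pvRevLoop k (r ++ t) c := by
  induction r generalizing c with
  | nil => simp at h
  | cons a r ih =>
    rw [List.cons_append, List.cons_append, pvRevLoop_cons, pvRevLoop_cons]
    by_cases ha : a = k
    · have h' : ∃ z ∈ r, z ≠ k := by
        rcases h with ⟨z, hz, hzk⟩
        rcases List.mem_cons.mp hz with hz0 | hzr
        · exact absurd (hz0.trans ha) hzk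
        · exact ⟨z, hzr, hzk⟩
      rw [if_pos ha, if_pos ha]
      exact ih _ h'
    · rw [if_neg ha, if_neg ha]

-- if r is all k, pvRevLoop consumes r whole
theorem pvRevLoop_all (r : List String) (k : String) (s : List String) (c : Int)
    (h : ∀ z ∈ r, z = k) :
    pvRevLoop k (r ++ s) c = pvRevLoop k s (c + r.length) := by
  induction r generalizing c with
  | nil => simp
  | cons a r ih =>
    have ha : a = k := h a (by simp)
    rw [List.cons_append, pvRevLoop_cons, if_pos ha,
      ih (c + 1) (fun z hz => h z (by simp [hz]))]
    congr 1
    simp only [List.length_cons]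
    push_cast
    ring

theorem pvTR_all (x : String) (xs : List String) (h : ∀ z ∈ xs, z = x) :
    pvTR (x :: xs) = 1 + xs.length := by
  unfold pvTR
  rw [show (x :: xs).reverse = xs.reverse ++ [x] by simp]
  cases hr : xs.reverse with
  | nil =>
    have : xs = [] := List.reverse_eq_nil_iff.mp hr
    subst this
    rfl
  | cons h0 r =>
    have hmem : ∀ z ∈ h0 :: r, z = x := by
      intro z hz
      exact h z (by simpa using (hr ▸ hz : z ∈ xs.reverse))
    have hh0 : h0 = x := hmem h0 (by simp)
    rw [List.cons_append]
    show pvRevLoop h0 (r ++ [x]) 1 = 1 + (xs.length : Int)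
    rw [hh0, pvRevLoop_all r x [x] 1 (fun z hz => hmem z (by simp [hz])),
      pvRevLoop_cons, if_pos rfl]
    have hlen : xs.length = r.length + 1 := by simpa using congrArg List.length hr
    show (1 : Int) + (r.length : Int) + 1 = 1 + (xs.length : Int)
    rw [hlen]
    push_cast
    ring

-- broken run inside ys: the element in front does not change the last run
theorem pvTR_front (x y : String) (ys : List String) (hall : ¬ ∀ z ∈ ys, z = y) :
    pvTR (y :: ys) = pvTR (x :: y :: ys) := by
  have hys : ys ≠ [] := by rintro rfl; exact hall (by simp)
  obtain ⟨h0, r, hr⟩ : ∃ h0 r, ys.reverse = h0 :: r := by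
    cases h : ys.reverse with
    | nil => exact absurd (List.reverse_eq_nil_iff.mp h) hys
    | cons a b => exact ⟨a, b, rfl⟩
  unfold pvTR
  rw [show (y :: ys).reverse = ys.reverse ++ [y] by simp,
      show (x :: y :: ys).reverse = ys.reverse ++ [y, x] by simp, hr,
      List.cons_append, List.cons_append]
  show pvRevLoop h0 (r ++ [y]) 1 = pvRevLoop h0 (r ++ [y, x]) 1
  have hex : ∃ z ∈ r ++ [y], z ≠ h0 := by
    push_neg at hall
    obtain ⟨z, hz, hzy⟩ := hall
    by_cases hh : h0 = y
    · have hzr : z ∈ h0 :: r := by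
        have : z ∈ ys.reverse := by simpa using hz
        exact hr ▸ this
      rcases List.mem_cons.mp hzr with hz0 | hzr
      · exact absurd (hz0.trans hh) hzy
      · exact ⟨z, by simp [hzr], fun h => hzy (h.trans hh)⟩
    · exact ⟨y, by simp, fun h => hh h.symm⟩
  have := pvRevLoop_stop (r ++ [y]) h0 [] [x] 1 hex
  simpa using this

-- all of ys equals y but x differs: the last run is y :: ys
theorem pvTR_front_all (x y : String) (ys : List String) (hy : y ≠ x)
    (hall : ∀ z ∈ ys, z = y) : pvTR (x :: y :: ys) = 1 + ys.length := by
  unfold pvTR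
  rw [show (x :: y :: ys).reverse = ys.reverse ++ [y, x] by simp]
  cases hr : ys.reverse with
  | nil =>
    have : ys = [] := List.reverse_eq_nil_iff.mp hr
    subst this
    show pvRevLoop y [x] 1 = 1 + ((0 : Nat) : Int)
    rw [pvRevLoop_cons, if_neg (fun h => hy h.symm)]
    norm_num
  | cons h0 r =>
    have hmem : ∀ z ∈ h0 :: r, z = y := by
      intro z hz
      exact hall z (by simpa using (hr ▸ hz : z ∈ ys.reverse))
    have hh0 : h0 = y := hmem h0 (by simp)
    rw [List.cons_append]
    show pvRevLoop h0 (r ++ [y, x]) 1 = 1 + (ys.length : Int)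
    rw [hh0, pvRevLoop_all r y [y, x] 1 (fun z hz => hmem z (by simp [hz])),
      pvRevLoop_cons, if_pos rfl, pvRevLoop_cons, if_neg (fun h => hy h.symm)]
    have hlen : ys.length = r.length + 1 := by simpa using congrArg List.length hr
    rw [hlen]
    push_cast
    ring

theorem pvGroupLoop_eq (xs : List String) (x : String) (c : Int) :
    pvGroupLoop x c xs = if ∀ z ∈ xs, z = x then c + xs.length else pvTR (x :: xs) := by
  induction xs generalizing x c with
  | nil => simp [pvGroupLoop]
  | cons y ys ih =>
    rw [pvGroupLoop_cons]
    by_cases hy : y = x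
    · subst hy
      rw [if_pos rfl, ih]
      by_cases hall : ∀ z ∈ ys, z = y
      · have hall' : ∀ z ∈ y :: ys, z = y := by
          intro z hz
          rcases List.mem_cons.mp hz with hz0 | hzr
          · exact hz0
          · exact hall z hzr
        rw [if_pos hall, if_pos hall']
        simp only [List.length_cons]
        push_cast
        ring
      · have hall2 : ¬ ∀ z ∈ y :: ys, z = y :=
          fun hc => hall (fun z hz => hc z (List.mem_cons_of_mem _ hz))
        rw [if_neg hall, if_neg hall2]
        exact pvTR_front y y ys hall
    · rw [if_neg hy, ih]
      have hnot : ¬ ∀ z ∈ y :: ys, z = x := fun hc => hy (hc y (by simp))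
      rw [if_neg hnot]
      by_cases hall : ∀ z ∈ ys, z = y
      · rw [if_pos hall, pvTR_front_all x y ys hy hall]
      · rw [if_neg hall]
        exact pvTR_front x y ys hall

theorem alt_eq_pvTR (x : String) (xs : List String) :
    get_consecutive_count_alt (x :: xs) = pvTR (x :: xs) := by
  show pvGroupLoop x 1 xs = pvTR (x :: xs)
  rw [pvGroupLoop_eq]
  by_cases hall : ∀ z ∈ xs, z = x
  · rw [if_pos hall, pvTR_all x xs hall]
  · rw [if_neg hall]

theorem a_eq_pvTR (x : String) (xs : List String) :
    get_consecutive_count (x :: xs) = pvTR (x :: xs) := by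
  unfold get_consecutive_count
  rw [if_neg (by simp), PySem.List.pyGet?_neg_one]
  obtain ⟨h0, r, hr⟩ : ∃ h0 r, (x :: xs).reverse = h0 :: r := by
    cases h : (x :: xs).reverse with
    | nil => exact absurd h (by simp)
    | cons a b => exact ⟨a, b, rfl⟩
  have hlast : (x :: xs).getLast? = some h0 := by
    rw [List.getLast?_eq_head?_reverse, hr]
    rfl
  rw [hlast]
  show pvALoop (x :: xs) h0 (PySem.List.pyRange (((x :: xs).length : Int) - 1) (-1) (-1)) 0
      = pvTR (x :: xs)
  rw [pvALoop_eq_revLoop, hr, pvRevLoop_cons, if_pos rfl]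
  unfold pvTR
  rw [hr]
  show pvRevLoop h0 r (0 + 1) = pvRevLoop h0 r 1
  norm_num

-- ===== VERDICT (by name: the statement is the Claim_ definition above) =====
theorem get_consecutive_count_spec : Claim_equal_get_consecutive_count := by
  intro queue _
  unfold Spec_get_consecutive_count
  cases queue with
  | nil => rfl
  | cons x xs => rw [a_eq_pvTR, alt_eq_pvTR]
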